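-- pv_equiv track=rewrite | github.com/danielWatson3141/coderID | 2984486(small)/10561066/5634947029139456/0/extracted/solution.py | check
-- ===== SOURCE A (Python) =====
-- def check( OUTLETS , DEVICES , INV_OUTLETS , INV_DEVICES , LL , NN , start , count ) :
--     # pprint.pprint( "start : ")
--     # pprint.pprint( start )
--     # pprint.pprint( "Count : ")
--     # pprint.pprint( count )
--     # if start > 0 :
--     #     pprint.pprint( "C" )
--     #     pprint.pprint( INV_OUTLETS[start-1] )
--
--     for ii in range( start , LL ) :
--         sum_io = sum( INV_OUTLETS[ii] )
--         sum_id = sum( INV_DEVICES[ii] )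
--         # pprint.pprint( sum_io )
--         # pprint.pprint( sum_id )
--         if sum_io == sum_id :
--             # check_both
--             cc , result = check( OUTLETS , DEVICES , INV_OUTLETS , INV_DEVICES , LL , NN , 1+ii , count )
--             if result :
--                 return ( cc , result )
--             # test with flip
--             # count += 1
--             # pprint.pprint( "A" )
--             # pprint.pprint( INV_OUTLETS[ii] )
--             for jj , elem in enumerate( INV_OUTLETS[ii] ) :
--                 INV_OUTLETS[ii][jj] = not INV_OUTLETS[ii][jj]
--             # pprint.pprint( "B" )
--             # pprint.pprint( INV_OUTLETS[ii] )
--             cc , result = check( OUTLETS , DEVICES , INV_OUTLETS , INV_DEVICES , LL , NN , 1+ii , 1+count )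
--             # flip back - may not be necessary
--             for jj , elem in enumerate( INV_OUTLETS[ii] ) :
--                 INV_OUTLETS[ii][jj] = not INV_OUTLETS[ii][jj]
--             return ( cc , result )
--             pass
--         elif sum_io == NN - sum_id :
--             # flip switch
--             # count += 1
--             for jj , elem in enumerate( INV_OUTLETS[ii] ) :
--                 INV_OUTLETS[ii][jj] = not INV_OUTLETS[ii][jj]
--             cc , result = check( OUTLETS , DEVICES , INV_OUTLETS , INV_DEVICES , LL , NN , 1+ii , 1+count )
--             for jj , elem in enumerate( INV_OUTLETS[ii] ) :
--                 INV_OUTLETS[ii][jj] = not INV_OUTLETS[ii][jj]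
--             return ( cc , result )
--
--         else :
--             return ( count , False )
--         #end-if-elif-else
--     #end-for
--     RE_INV_OUTLETS = set( zip( *INV_OUTLETS ) )
--     RE_INV_DEVICES = set( zip( *INV_DEVICES ) )
--     # pprint.pprint( RE_INV_OUTLETS )
--     # pprint.pprint( RE_INV_DEVICES )
--     # pprint.pprint( count )
--     # pprint.pprint( RE_INV_OUTLETS == RE_INV_DEVICES )
--     return ( count , RE_INV_OUTLETS == RE_INV_DEVICES )
-- ===== SOURCE B (Python) =====
-- # Iterative DFS over an explicit stack of (row, count, flips) frames; never
-- # mutates INV_OUTLETS (A mutates it in place but always restores it before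
-- # returning, so return-value equivalence is the whole story).
-- def check(OUTLETS, DEVICES, INV_OUTLETS, INV_DEVICES, LL, NN, start, count):
--     stack = [(start, count, ())]
--     last = count
--     while stack:
--         ii, cnt, flips = stack.pop()
--         if ii < LL:
--             sum_io = sum(INV_OUTLETS[ii])
--             sum_id = sum(INV_DEVICES[ii])
--             if sum_io == sum_id:
--                 # flip child pushed first so the no-flip child is explored first
--                 stack.append((ii + 1, cnt + 1, flips + (ii,)))
--                 stack.append((ii + 1, cnt, flips))
--             elif sum_io == NN - sum_id:
--                 stack.append((ii + 1, cnt + 1, flips + (ii,)))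
--             else:
--                 last = cnt
--         else:
--             M = [list(row) for row in INV_OUTLETS]
--             for k in flips:
--                 M[k] = [not x for x in M[k]]
--             if set(zip(*M)) == set(zip(*INV_DEVICES)):
--                 return (cnt, True)
--             last = cnt
--     return (last, False)
-- ===== Notes on version B (the rewrite author's own statement) =====
-- stated objective: alternative
-- what changed: Replaces A's recursive backtracking that flips rows of INV_OUTLETS in place (and flips them back on return) with an iterative DFS over an explicit stack of (row, count, flips) frames, where each frame carries its set of flipped rows as data and the flips are applied once at a leaf; INV_OUTLETS is never mutated.
-- outside the precondition, e.g. on check([], [], [[True]], [[False]], 1, 1, -1, 0): A returns (1, True), B returns (2, False)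
import Mathlib
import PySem

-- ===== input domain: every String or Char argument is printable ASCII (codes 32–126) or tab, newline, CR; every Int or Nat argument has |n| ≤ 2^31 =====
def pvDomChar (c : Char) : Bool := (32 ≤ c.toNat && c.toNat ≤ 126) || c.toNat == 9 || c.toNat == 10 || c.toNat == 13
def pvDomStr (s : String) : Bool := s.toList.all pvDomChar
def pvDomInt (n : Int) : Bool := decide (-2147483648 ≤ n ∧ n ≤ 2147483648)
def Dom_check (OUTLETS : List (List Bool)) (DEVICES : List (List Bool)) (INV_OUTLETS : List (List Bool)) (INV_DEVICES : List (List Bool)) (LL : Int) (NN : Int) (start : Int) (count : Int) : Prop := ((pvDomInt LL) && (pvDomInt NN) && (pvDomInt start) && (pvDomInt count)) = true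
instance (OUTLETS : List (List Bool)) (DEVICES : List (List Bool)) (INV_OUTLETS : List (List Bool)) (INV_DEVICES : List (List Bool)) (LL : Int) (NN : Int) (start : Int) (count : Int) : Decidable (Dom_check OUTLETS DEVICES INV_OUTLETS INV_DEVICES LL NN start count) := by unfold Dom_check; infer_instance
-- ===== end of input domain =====

-- B replaces A's recursive backtracking (with in-place flip/unflip of INV_OUTLETS) by an
-- explicit-stack iterative DFS carrying each frame's flip set as data; return-value
-- equivalence only (A mutates INV_OUTLETS in place but always restores it before returning).

-- ===== PORT A =====
-- sum(row): Python sums bools as 0/1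
def pvSumRow (r : List Bool) : Int := r.foldl (fun a b => a + (if b then 1 else 0)) 0

-- the in-place loop  'for jj,elem in enumerate(M[ii]): M[ii][jj] = not M[ii][jj]'
-- modelled functionally: M with row ii replaced by its elementwise negation
def pvFlipRow (M : List (List Bool)) (ii : Int) : List (List Bool) :=
  match PySem.List.pyGet? M ii with
  | none => M
  | some r => PySem.List.pySetD M ii (r.map not)

-- zip(*M): the columns of M, truncated to the shortest row; [] when M = []
def pvCols (M : List (List Bool)) : List (List Bool) :=
  match M with
  | [] => []
  | r :: rs =>
      (List.range (rs.foldl (fun a row => min a row.length) r.length)).map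
        (fun j => (r :: rs).map (fun row => row.getD j false))

-- set(zip(*M)) == set(zip(*N))
def pvColsSetEq (M N : List (List Bool)) : Bool :=
  PySem.Set.equal (PySem.Set.ofList (pvCols M)) (PySem.Set.ofList (pvCols N))

-- A: every branch of the 'for ii in range(start, LL)' body returns, so only ii = start runs;
-- flip / recurse / flip-back is passing the flipped matrix to the recursive call (return value only)
def check (OUTLETS : List (List Bool)) (DEVICES : List (List Bool)) (INV_OUTLETS : List (List Bool)) (INV_DEVICES : List (List Bool)) (LL : Int) (NN : Int) (start : Int) (count : Int) : Int × Bool :=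
  if h : start < LL then
    let sum_io := pvSumRow ((PySem.List.pyGet? INV_OUTLETS start).getD [])
    let sum_id := pvSumRow ((PySem.List.pyGet? INV_DEVICES start).getD [])
    if sum_io = sum_id then
      let r1 := check OUTLETS DEVICES INV_OUTLETS INV_DEVICES LL NN (1 + start) count
      if r1.2 then r1
      else check OUTLETS DEVICES (pvFlipRow INV_OUTLETS start) INV_DEVICES LL NN (1 + start) (1 + count)
    else if sum_io = NN - sum_id then
      check OUTLETS DEVICES (pvFlipRow INV_OUTLETS start) INV_DEVICES LL NN (1 + start) (1 + count)
    else (count, false)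
  else
    (count, pvColsSetEq INV_OUTLETS INV_DEVICES)
termination_by (LL - start).toNat
decreasing_by all_goals omega

-- ===== PORT B =====
-- 'M = [list(row) for row in INV_OUTLETS]; for k in flips: M[k] = [not x for x in M[k]]'
def pvApplyFlips (M : List (List Bool)) (flips : List Int) : List (List Bool) :=
  flips.foldl pvFlipRow M

-- termination measure helper for the DFS loop (cited by decreasing_by only)
theorem pv_pow3_lt (LL ii : Int) (h : ii < LL) :
    3 ^ (LL - (ii + 1)).toNat + 3 ^ (LL - (ii + 1)).toNat < 3 ^ (LL - ii).toNat := by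
  have hd : (LL - ii).toNat = (LL - (ii + 1)).toNat + 1 := by omega
  rw [hd, pow_succ]
  have hp : 0 < 3 ^ (LL - (ii + 1)).toNat := Nat.pow_pos (by norm_num)
  omega

-- the while-stack loop of Source B; 'last' is the count of the most recent dead end
def pvLoop (INV_OUTLETS : List (List Bool)) (INV_DEVICES : List (List Bool)) (LL : Int) (NN : Int) (stack : List (Int × Int × List Int)) (last : Int) : Int × Bool :=
  match stack with
  | [] => (last, false)
  | (ii, cnt, flips) :: rest =>
    if h : ii < LL then
      let sum_io := pvSumRow ((PySem.List.pyGet? INV_OUTLETS ii).getD [])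
      let sum_id := pvSumRow ((PySem.List.pyGet? INV_DEVICES ii).getD [])
      if sum_io = sum_id then
        pvLoop INV_OUTLETS INV_DEVICES LL NN ((ii + 1, cnt, flips) :: (ii + 1, cnt + 1, flips ++ [ii]) :: rest) last
      else if sum_io = NN - sum_id then
        pvLoop INV_OUTLETS INV_DEVICES LL NN ((ii + 1, cnt + 1, flips ++ [ii]) :: rest) last
      else
        pvLoop INV_OUTLETS INV_DEVICES LL NN rest cnt
    else
      if pvColsSetEq (pvApplyFlips INV_OUTLETS flips) INV_DEVICES then (cnt, true)
      else pvLoop INV_OUTLETS INV_DEVICES LL NN rest cnt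
termination_by (stack.map (fun f => 3 ^ (LL - f.1).toNat)).sum
decreasing_by
  · simp only [List.map_cons, List.sum_cons]
    have := pv_pow3_lt LL ii h
    omega
  · simp only [List.map_cons, List.sum_cons]
    have := pv_pow3_lt LL ii h
    have h2 : 0 < 3 ^ (LL - (ii + 1)).toNat := Nat.pow_pos (by norm_num)
    omega
  · simp only [List.map_cons, List.sum_cons]
    have : 0 < 3 ^ (LL - ii).toNat := Nat.pow_pos (by norm_num)
    omega
  · simp only [List.map_cons, List.sum_cons]
    have : 0 < 3 ^ (LL - ii).toNat := Nat.pow_pos (by norm_num)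
    omega

def check_alt (OUTLETS : List (List Bool)) (DEVICES : List (List Bool)) (INV_OUTLETS : List (List Bool)) (INV_DEVICES : List (List Bool)) (LL : Int) (NN : Int) (start : Int) (count : Int) : Int × Bool :=
  pvLoop INV_OUTLETS INV_DEVICES LL NN [(start, count, [])] count

-- ===== PRECONDITION & SPEC =====
-- Pre_ excludes the inputs where the Python A can hit IndexError (LL exceeding the row count
-- while the search is still running) and those with start < LL negative, where A silently reads
-- rows through Python's negative-index wraparound; on part of both regions A still happens to
-- return (early mismatch, wraparound in range) — see the cites.
def Pre_check (OUTLETS : List (List Bool)) (DEVICES : List (List Bool)) (INV_OUTLETS : List (List Bool)) (INV_DEVICES : List (List Bool)) (LL : Int) (NN : Int) (start : Int) (count : Int) : Prop :=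
  LL ≤ start ∨ (0 ≤ start ∧ LL ≤ (INV_OUTLETS.length : Int) ∧ LL ≤ (INV_DEVICES.length : Int))
instance (OUTLETS : List (List Bool)) (DEVICES : List (List Bool)) (INV_OUTLETS : List (List Bool)) (INV_DEVICES : List (List Bool)) (LL : Int) (NN : Int) (start : Int) (count : Int) : Decidable (Pre_check OUTLETS DEVICES INV_OUTLETS INV_DEVICES LL NN start count) := by unfold Pre_check; infer_instance

def pvWitness_check : List (List Bool) × List (List Bool) × List (List Bool) × List (List Bool) × Int × Int × Int × Int :=
  ([], [], [[true, false], [true, true]], [[false, true], [true, true]], 2, 2, 0, 0)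

def Spec_check (OUTLETS : List (List Bool)) (DEVICES : List (List Bool)) (INV_OUTLETS : List (List Bool)) (INV_DEVICES : List (List Bool)) (LL : Int) (NN : Int) (start : Int) (count : Int) (out : Int × Bool) : Prop := out = check_alt OUTLETS DEVICES INV_OUTLETS INV_DEVICES LL NN start count
instance (OUTLETS : List (List Bool)) (DEVICES : List (List Bool)) (INV_OUTLETS : List (List Bool)) (INV_DEVICES : List (List Bool)) (LL : Int) (NN : Int) (start : Int) (count : Int) (out : Int × Bool) : Decidable (Spec_check OUTLETS DEVICES INV_OUTLETS INV_DEVICES LL NN start count out) := by unfold Spec_check; infer_instance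

-- ===== CLAIM (what is proved, stated in full; the proofs are below) =====
def Claim_equal_check : Prop := ∀ (OUTLETS : List (List Bool)) (DEVICES : List (List Bool)) (INV_OUTLETS : List (List Bool)) (INV_DEVICES : List (List Bool)) (LL : Int) (NN : Int) (start : Int) (count : Int), Dom_check OUTLETS DEVICES INV_OUTLETS INV_DEVICES LL NN start count → Pre_check OUTLETS DEVICES INV_OUTLETS INV_DEVICES LL NN start count → Spec_check OUTLETS DEVICES INV_OUTLETS INV_DEVICES LL NN start count (check OUTLETS DEVICES INV_OUTLETS INV_DEVICES LL NN start count)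

-- ===== LEMMAS AND PROOFS =====

theorem pvFlipRow_get_ne (M : List (List Bool)) (k ii : Int) (hk : 0 ≤ k) (hii : 0 ≤ ii) (hne : k ≠ ii) :
    PySem.List.pyGet? (pvFlipRow M k) ii = PySem.List.pyGet? M ii := by
  unfold pvFlipRow
  cases hg : PySem.List.pyGet? M k with
  | none => rfl
  | some r =>
    dsimp only
    rw [PySem.List.pySetD_of_nonneg _ _ hk,
        PySem.List.pyGet?_of_nonneg _ hii, PySem.List.pyGet?_of_nonneg _ hii]
    rw [List.getElem?_set_ne]
    omega

theorem pvApplyFlips_get (M : List (List Bool)) (flips : List Int) (ii : Int) (hii : 0 ≤ ii)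
    (hf : ∀ k ∈ flips, 0 ≤ k ∧ k ≠ ii) :
    PySem.List.pyGet? (pvApplyFlips M flips) ii = PySem.List.pyGet? M ii := by
  induction flips generalizing M with
  | nil => rfl
  | cons k l ih =>
    have hk := hf k (by simp)
    calc PySem.List.pyGet? (pvApplyFlips (pvFlipRow M k) l) ii
        = PySem.List.pyGet? (pvFlipRow M k) ii := ih _ (fun x hx => hf x (by simp [hx]))
      _ = PySem.List.pyGet? M ii := pvFlipRow_get_ne M k ii hk.1 hii hk.2

theorem pvApplyFlips_append (M : List (List Bool)) (l : List Int) (k : Int) :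
    pvApplyFlips M (l ++ [k]) = pvFlipRow (pvApplyFlips M l) k := by
  simp [pvApplyFlips, List.foldl_append]

theorem pvLoop_eq (O D INV_O INV_D : List (List Bool)) (LL NN : Int) :
    ∀ (d : Nat) (ii cnt : Int) (flips : List Int) (rest : List (Int × Int × List Int)) (last : Int),
      (LL - ii).toNat ≤ d → (0 ≤ ii ∨ LL ≤ ii) → (∀ k ∈ flips, 0 ≤ k ∧ k < ii) →
      pvLoop INV_O INV_D LL NN ((ii, cnt, flips) :: rest) last =
        (if (check O D (pvApplyFlips INV_O flips) INV_D LL NN ii cnt).2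
         then check O D (pvApplyFlips INV_O flips) INV_D LL NN ii cnt
         else pvLoop INV_O INV_D LL NN rest (check O D (pvApplyFlips INV_O flips) INV_D LL NN ii cnt).1) := by
  intro d
  induction d with
  | zero =>
    intro ii cnt flips rest last hd _ _
    have hii : ¬ ii < LL := by omega
    rw [pvLoop, check]
    simp only [dif_neg hii]
    by_cases hc : pvColsSetEq (pvApplyFlips INV_O flips) INV_D <;> simp [hc]
  | succ d ih =>
    intro ii cnt flips rest last hd hpos hf
    by_cases hii : ii < LL
    · have h0 : 0 ≤ ii := by omega
      have hsum : PySem.List.pyGet? (pvApplyFlips INV_O flips) ii = PySem.List.pyGet? INV_O ii :=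
        pvApplyFlips_get INV_O flips ii h0 (fun k hk => ⟨(hf k hk).1, by have := (hf k hk).2; omega⟩)
      have h1 : (1 : Int) + ii = ii + 1 := by omega
      have hd' : (LL - (ii + 1)).toNat ≤ d := by omega
      have hpos' : (0 : Int) ≤ ii + 1 ∨ LL ≤ ii + 1 := by omega
      have hf' : ∀ k ∈ flips, 0 ≤ k ∧ k < ii + 1 := fun k hk => ⟨(hf k hk).1, by have := (hf k hk).2; omega⟩
      have hf'' : ∀ k ∈ flips ++ [ii], 0 ≤ k ∧ k < ii + 1 := by
        intro k hk
        rcases List.mem_append.1 hk with h | h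
        · exact ⟨(hf k h).1, by have := (hf k h).2; omega⟩
        · simp at h; omega
      rw [pvLoop, check]
      simp only [dif_pos hii, hsum, h1]
      set sio := pvSumRow ((PySem.List.pyGet? INV_O ii).getD []) with hsio
      set sid := pvSumRow ((PySem.List.pyGet? INV_D ii).getD []) with hsid
      have h2 : (1 : Int) + cnt = cnt + 1 := by omega
      by_cases hb1 : sio = sid
      · simp only [if_pos hb1]
        rw [ih (ii + 1) cnt flips _ last hd' hpos' hf']
        set r1 := check O D (pvApplyFlips INV_O flips) INV_D LL NN (ii + 1) cnt with hr1
        cases hres : r1.2 with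
        | true => simp [hres]
        | false =>
          simp only [Bool.false_eq_true, if_false]
          rw [ih (ii + 1) (cnt + 1) (flips ++ [ii]) rest r1.1 hd' hpos' hf'']
          rw [pvApplyFlips_append, h2]
      · simp only [if_neg hb1]
        by_cases hb2 : sio = NN - sid
        · simp only [if_pos hb2]
          rw [ih (ii + 1) (cnt + 1) (flips ++ [ii]) rest last hd' hpos' hf'']
          rw [pvApplyFlips_append, h2]
        · simp only [if_neg hb2]
          simp
    · -- leaf case, identical to the zero case
      rw [pvLoop, check]
      simp only [dif_neg hii]
      by_cases hc : pvColsSetEq (pvApplyFlips INV_O flips) INV_D <;> simp [hc]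

-- ===== VERDICT (by name: the statement is the Claim_ definition above) =====
theorem check_spec : Claim_equal_check := by
  unfold Claim_equal_check
  intro O D INV_O INV_D LL NN start count _ hpre
  unfold Spec_check check_alt
  have hpos : 0 ≤ start ∨ LL ≤ start := by
    rcases hpre with h | h
    · exact Or.inr h
    · exact Or.inl h.1
  rw [pvLoop_eq O D INV_O INV_D LL NN (LL - start).toNat start count [] [] count le_rfl hpos (by simp)]
  have hA : pvApplyFlips INV_O [] = INV_O := rfl
  rw [hA]
  rcases hc : check O D INV_O INV_D LL NN start count with ⟨c, b⟩
  cases b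
  · simp [pvLoop]
  · simp
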